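-- pv_equiv track=rewrite | github.com/pratyush-pilli/cimventory | purchase-module/purchase_module/items/views.py | generate_next_alpha_code
-- ===== SOURCE A (Python) =====
-- def generate_next_alpha_code(existing_codes):
--     """
--     Generate next available alphabetic code (AB format)
--     """
--     if not existing_codes:
--         return "AA"
--
--     # Filter only valid 2-character alphabetic codes
--     alpha_codes = [code for code in existing_codes if code and len(code) == 2 and code.isalpha() and code.isupper()]
--
--     if not alpha_codes:
--         return "AA"
--
--     last_code = max(alpha_codes)
--     if last_code[1] < 'Z':
--         return f"{last_code[0]}{chr(ord(last_code[1]) + 1)}"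
--     else:
--         if last_code[0] < 'Z':
--             return f"{chr(ord(last_code[0]) + 1)}A"
--         else:
--             return "AA"  # Wrap around if we've used all possibilities
-- ===== SOURCE B (Python) =====
-- def _code_index(code):
--     """Base-26 index of a valid 2-letter uppercase code, or -1 if invalid."""
--     if len(code) == 2 and 'A' <= code[0] <= 'Z' and 'A' <= code[1] <= 'Z':
--         return (ord(code[0]) - 65) * 26 + (ord(code[1]) - 65)
--     return -1
--
--
-- def generate_next_alpha_code(existing_codes):
--     best = -1
--     for code in existing_codes:
--         i = _code_index(code)
--         if best < i:
--             best = i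
--     if best < 0:
--         return "AA"
--     hi, lo = divmod((best + 1) % 676, 26)
--     return chr(65 + hi) + chr(65 + lo)
-- ===== Notes on version B (the rewrite author's own statement) =====
-- stated objective: alternative
-- what changed: Replaces the filter-list + lexicographic max + nested per-letter if/else carry logic with a single pass that keeps only the running maximum base-26 integer index of the valid codes, then re-encodes (index+1) mod 676 with divmod, which yields the increment, the carry and the ZZ wrap-around from one arithmetic formula.
import Mathlib
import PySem

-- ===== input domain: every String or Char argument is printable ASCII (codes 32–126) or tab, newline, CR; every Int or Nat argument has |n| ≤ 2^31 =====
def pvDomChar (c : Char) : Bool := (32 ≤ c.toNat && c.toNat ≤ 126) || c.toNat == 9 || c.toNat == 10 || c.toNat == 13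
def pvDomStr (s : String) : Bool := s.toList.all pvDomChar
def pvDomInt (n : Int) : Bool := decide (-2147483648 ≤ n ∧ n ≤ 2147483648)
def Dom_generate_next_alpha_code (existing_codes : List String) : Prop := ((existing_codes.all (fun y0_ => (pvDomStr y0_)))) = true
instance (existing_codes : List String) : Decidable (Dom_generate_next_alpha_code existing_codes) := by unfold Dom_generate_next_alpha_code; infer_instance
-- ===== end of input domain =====

-- B replaces A's filter+lexicographic-max+nested carry branches with one pass keeping the
-- running max base-26 index and an arithmetic re-encode of (index+1) mod 676 (objective: alternative).

-- ===== PORT A =====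
-- hand port of Python's str.isupper() (no PySem primitive): no lowercase cased char and at
-- least one cased char; exact on the ASCII domain, where the cased chars are a-z / A-Z
def pvStrIsupperA (code : String) : Bool :=
  code.toList.all (fun c => !PySem.Chars.islower c) && code.toList.any (fun c => PySem.Chars.isupper c)

-- the filter predicate of A's list comprehension: code and len(code)==2 and code.isalpha() and code.isupper()
def pvValidA (code : String) : Bool :=
  decide (code ≠ "") && (PySem.Str.len code == 2) && PySem.Str.strIsalpha code && pvStrIsupperA code

def generate_next_alpha_code (existing_codes : List String) : String :=
  if existing_codes.isEmpty then "AA"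
  else
    let alpha_codes := existing_codes.filter pvValidA
    if alpha_codes.isEmpty then "AA"
    else
      match PySem.List.max? alpha_codes (fun x => x) with
      | none => "AA"  -- unreachable: alpha_codes is nonempty here
      | some last_code =>
        match last_code.toList with
        | [c0, c1] =>
          if c1 < 'Z' then String.ofList [c0, Char.ofNat (c1.toNat + 1)]
          else if c0 < 'Z' then String.ofList [Char.ofNat (c0.toNat + 1), 'A']
          else "AA"
        | _ => "AA"  -- unreachable: the filter guarantees length 2

-- ===== PORT B =====
def pvCodeIndex (code : String) : Int :=
  let cs := code.toList
  if cs.length == 2 then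
    let c0 := cs.getD 0 ' '
    let c1 := cs.getD 1 ' '
    if 'A' ≤ c0 && c0 ≤ 'Z' && 'A' ≤ c1 && c1 ≤ 'Z'
      then ((c0.toNat : Int) - 65) * 26 + ((c1.toNat : Int) - 65)
      else -1
  else -1

def generate_next_alpha_code_alt (existing_codes : List String) : String :=
  let best := existing_codes.foldl
    (fun b code => let i := pvCodeIndex code; if b < i then i else b) (-1 : Int)
  if best < 0 then "AA"
  else
    let n := PySem.Int.mod (best + 1) 676
    let hi := PySem.Int.floordiv n 26
    let lo := PySem.Int.mod n 26
    String.ofList [Char.ofNat (65 + hi).toNat, Char.ofNat (65 + lo).toNat]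

-- ===== PRECONDITION & SPEC =====
def Spec_generate_next_alpha_code (existing_codes : List String) (out : String) : Prop := out = generate_next_alpha_code_alt existing_codes
instance (existing_codes : List String) (out : String) : Decidable (Spec_generate_next_alpha_code existing_codes out) := by unfold Spec_generate_next_alpha_code; infer_instance

-- ===== CLAIM (what is proved, stated in full; the proofs are below) =====
def Claim_equal_generate_next_alpha_code : Prop := ∀ (existing_codes : List String), Dom_generate_next_alpha_code existing_codes → Spec_generate_next_alpha_code existing_codes (generate_next_alpha_code existing_codes)

-- ===== LEMMAS AND PROOFS =====

theorem pvValidA_iff (code : String) :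
    pvValidA code = true ↔
      ∃ c0 c1, code.toList = [c0, c1] ∧ 'A' ≤ c0 ∧ c0 ≤ 'Z' ∧ 'A' ≤ c1 ∧ c1 ≤ 'Z' := by
  constructor
  · intro h
    simp only [pvValidA, Bool.and_eq_true, beq_iff_eq, decide_eq_true_eq] at h
    obtain ⟨⟨⟨hne, hlen⟩, halpha⟩, hup⟩ := h
    rw [PySem.Str.len_eq] at hlen
    have hlen2 : code.toList.length = 2 := by exact_mod_cast hlen
    obtain ⟨c0, c1, hl⟩ : ∃ c0 c1, code.toList = [c0, c1] := by
      match hl : code.toList with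
      | [c0, c1] => exact ⟨c0, c1, rfl⟩
      | [] | [_] | _ :: _ :: _ :: _ => simp [hl] at hlen2
    refine ⟨c0, c1, hl, ?_⟩
    rw [PySem.Str.strIsalpha_eq] at halpha
    simp only [pvStrIsupperA, PySem.Chars.strIsalpha, hl, Bool.and_eq_true, List.all_cons,
      List.any_cons, List.all_nil, List.any_nil, Bool.or_eq_true, Bool.not_eq_true',
      PySem.Chars.isalpha, PySem.Chars.isupper, PySem.Chars.islower, decide_eq_true_eq,
      Bool.and_eq_false_iff, decide_eq_false_iff_not, not_le, List.isEmpty_cons] at halpha hup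
    rcases halpha with ⟨_, ha0, ha1, _⟩
    rcases hup with ⟨⟨hl0, hl1, _⟩, _⟩
    have g0 : 'A' ≤ c0 ∧ c0 ≤ 'Z' := by
      rcases ha0 with h | ⟨h1, h2⟩
      · exact h
      · rcases hl0 with h | h
        · exact absurd h (not_lt.mpr h1)
        · exact absurd h (not_lt.mpr h2)
    have g1 : 'A' ≤ c1 ∧ c1 ≤ 'Z' := by
      rcases ha1 with h | ⟨h1, h2⟩
      · exact h
      · rcases hl1 with h | h
        · exact absurd h (not_lt.mpr h1)
        · exact absurd h (not_lt.mpr h2)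
    exact ⟨g0.1, g0.2, g1.1, g1.2⟩
  · rintro ⟨c0, c1, hl, h0, h0', h1, h1'⟩
    have hne : code ≠ "" := by
      intro h; rw [h] at hl; simp at hl
    simp only [pvValidA, pvStrIsupperA, PySem.Str.len_eq, PySem.Str.strIsalpha_eq,
      PySem.Chars.strIsalpha, hl, Bool.and_eq_true, beq_iff_eq, decide_eq_true_eq,
      List.all_cons, List.any_cons, List.all_nil, List.any_nil, Bool.or_eq_true,
      Bool.not_eq_true', PySem.Chars.isalpha, PySem.Chars.isupper, PySem.Chars.islower,
      Bool.and_eq_false_iff, decide_eq_false_iff_not, not_le, List.isEmpty_cons]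
    have hZa : ('Z' : Char) < 'a' := by decide
    refine ⟨⟨⟨hne, by norm_num⟩, ⟨trivial, Or.inl ⟨h0, h0'⟩, Or.inl ⟨h1, h1'⟩, trivial⟩⟩,
      ⟨⟨Or.inl (lt_of_le_of_lt h0' hZa), Or.inl (lt_of_le_of_lt h1' hZa), trivial⟩, Or.inl ⟨h0, h0'⟩⟩⟩

theorem pvCodeIndex_of_valid (code : String) (c0 c1 : Char)
    (h : code.toList = [c0, c1]) (h0 : 'A' ≤ c0) (h0' : c0 ≤ 'Z') (h1 : 'A' ≤ c1) (h1' : c1 ≤ 'Z') :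
    pvCodeIndex code = ((c0.toNat : Int) - 65) * 26 + ((c1.toNat : Int) - 65) := by
  simp [pvCodeIndex, h, h0, h0', h1, h1']

theorem pvCodeIndex_nonneg_of_valid (code : String) (h : pvValidA code = true) :
    0 ≤ pvCodeIndex code := by
  obtain ⟨c0, c1, hl, h0, h0', h1, h1'⟩ := (pvValidA_iff code).mp h
  rw [pvCodeIndex_of_valid code c0 c1 hl h0 h0' h1 h1']
  have a0 : 65 ≤ c0.toNat := h0
  have a1 : 65 ≤ c1.toNat := h1
  omega

theorem pvCodeIndex_neg_of_invalid (code : String) (h : pvValidA code = false) :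
    pvCodeIndex code = -1 := by
  unfold pvCodeIndex
  match hl : code.toList with
  | [] | [_] | _ :: _ :: _ :: _ => simp
  | [c0, c1] =>
    simp only [List.length_cons, List.length_nil, List.getD]
    norm_num
    intro g0 g0' g1 g1'
    exfalso
    have : pvValidA code = true := (pvValidA_iff code).mpr ⟨c0, c1, hl, g0, g0', g1, g1'⟩
    rw [this] at h; cases h

theorem pvCodeIndex_mono (s t : String) (hs : pvValidA s = true) (ht : pvValidA t = true)
    (h : s ≤ t) : pvCodeIndex s ≤ pvCodeIndex t := by
  obtain ⟨c0, c1, hls, hs0, hs0', hs1, hs1'⟩ := (pvValidA_iff s).mp hs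
  obtain ⟨d0, d1, hlt, ht0, ht0', ht1, ht1'⟩ := (pvValidA_iff t).mp ht
  rw [pvCodeIndex_of_valid s c0 c1 hls hs0 hs0' hs1 hs1',
      pvCodeIndex_of_valid t d0 d1 hlt ht0 ht0' ht1 ht1']
  by_contra hlt'
  push Not at hlt'
  -- hlt' : idx t < idx s; derive t < s, contradicting s ≤ t
  have b0 : 65 ≤ c0.toNat := hs0
  have b0' : c0.toNat ≤ 90 := hs0'
  have b1 : 65 ≤ c1.toNat := hs1
  have b1' : c1.toNat ≤ 90 := hs1'
  have e0 : 65 ≤ d0.toNat := ht0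
  have e0' : d0.toNat ≤ 90 := ht0'
  have e1 : 65 ≤ d1.toNat := ht1
  have e1' : d1.toNat ≤ 90 := ht1'
  have hd : d0.toNat < c0.toNat ∨ (d0.toNat = c0.toNat ∧ d1.toNat < c1.toNat) := by omega
  have hts : t < s := by
    rw [String.lt_iff_toList_lt, hls, hlt]
    rcases hd with hd | ⟨hd, hd'⟩
    · exact List.Lex.rel hd
    · have : d0 = c0 := by apply Char.ext; exact UInt32.toNat_inj.mp hd
      subst this
      exact List.Lex.cons (List.Lex.rel hd')
  exact absurd hts (Std.not_lt.mpr h)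

theorem foldl_best_le (xs : List String) (a b : Int) (h : a ≤ b)
    (hb : ∀ c ∈ xs, pvCodeIndex c ≤ b) :
    xs.foldl (fun b code => let i := pvCodeIndex code; if b < i then i else b) a ≤ b := by
  induction xs generalizing a with
  | nil => simpa using h
  | cons x t ih =>
    simp only [List.foldl_cons]
    apply ih
    · by_cases hx : a < pvCodeIndex x
      · simpa [hx] using hb x (by simp)
      · simpa [hx] using h
    · intro c hc; exact hb c (by simp [hc])

theorem le_foldl_best (xs : List String) (a : Int) :
    a ≤ xs.foldl (fun b code => let i := pvCodeIndex code; if b < i then i else b) a := by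
  induction xs generalizing a with
  | nil => simp
  | cons x t ih =>
    simp only [List.foldl_cons]
    by_cases hx : a < pvCodeIndex x
    · exact le_trans (le_of_lt hx) (by simpa [hx] using ih (pvCodeIndex x))
    · simpa [hx] using ih a

theorem mem_le_foldl_best (xs : List String) (a : Int) (c : String) (hc : c ∈ xs) :
    pvCodeIndex c ≤ xs.foldl (fun b code => let i := pvCodeIndex code; if b < i then i else b) a := by
  induction xs generalizing a with
  | nil => cases hc
  | cons x t ih =>
    simp only [List.foldl_cons]
    rcases List.mem_cons.mp hc with rfl | hmem
    · by_cases hx : a < pvCodeIndex c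
      · simpa [hx] using le_foldl_best t (pvCodeIndex c)
      · exact le_trans (not_lt.mp hx) (by simpa [hx] using le_foldl_best t a)
    · by_cases hx : a < pvCodeIndex x <;> simpa [hx] using ih _ hmem

-- ===== VERDICT (by name: the statement is the Claim_ definition above) =====
theorem generate_next_alpha_code_spec : Claim_equal_generate_next_alpha_code := by
  intro xs _dom
  unfold Spec_generate_next_alpha_code generate_next_alpha_code generate_next_alpha_code_alt
  by_cases hx : xs.isEmpty
  · rw [List.isEmpty_iff] at hx
    subst hx
    rfl
  · simp only [hx]
    set L := xs.filter pvValidA with hLdef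
    by_cases hL : L.isEmpty
    · rw [List.isEmpty_iff] at hL
      simp only [hL]
      have hall : ∀ c ∈ xs, pvValidA c = false := by
        intro c hc
        by_contra hv
        have : c ∈ L := List.mem_filter.mpr ⟨hc, by simpa using hv⟩
        rw [hL] at this; cases this
      have hle := foldl_best_le xs (-1) (-1) le_rfl
        (fun c hc => by rw [pvCodeIndex_neg_of_invalid c (hall c hc)])
      have hge := le_foldl_best xs (-1)
      have hbest : xs.foldl (fun b code => let i := pvCodeIndex code; if b < i then i else b) (-1) = -1 :=
        le_antisymm hle hge
      simp [hbest]
    · have hLne : L ≠ [] := fun h => by simp [h] at hL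
      match hm : PySem.List.max? L (fun x => x) with
      | none => exact absurd ((PySem.List.max?_eq_none_iff L _).mp hm) hLne
      | some m =>
        simp only [hL]
        have hmem := PySem.List.max?_mem hm
        obtain ⟨hmx, hmv⟩ := List.mem_filter.mp hmem
        have hmax := PySem.List.max?_isMax hm
        obtain ⟨c0, c1, hl, h0, h0', h1, h1'⟩ := (pvValidA_iff m).mp hmv
        have hidx := pvCodeIndex_of_valid m c0 c1 hl h0 h0' h1 h1'
        have hnn : (0:Int) ≤ pvCodeIndex m := pvCodeIndex_nonneg_of_valid m hmv
        have hbest : xs.foldl (fun b code => let i := pvCodeIndex code; if b < i then i else b) (-1) = pvCodeIndex m := by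
          apply le_antisymm
          · apply foldl_best_le xs (-1) _ (by omega)
            intro c hc
            by_cases hv : pvValidA c = true
            · exact pvCodeIndex_mono c m hv hmv (hmax c (List.mem_filter.mpr ⟨hc, hv⟩))
            · rw [pvCodeIndex_neg_of_invalid c (Bool.not_eq_true _ ▸ hv)]; omega
          · exact mem_le_foldl_best xs (-1) m hmx
        simp only [hbest, hl, Bool.false_eq_true, if_false]
        have hBpos : ¬ (pvCodeIndex m < 0) := by omega
        rw [if_neg hBpos]
        rw [PySem.Int.mod_eq_emod_of_pos (by norm_num : (0:Int) < 676),
            PySem.Int.floordiv_eq_ediv_of_pos (by norm_num : (0:Int) < 26),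
            PySem.Int.mod_eq_emod_of_pos (by norm_num : (0:Int) < 26)]
        have b0 : 65 ≤ c0.toNat := h0
        have b0' : c0.toNat ≤ 90 := h0'
        have b1 : 65 ≤ c1.toNat := h1
        have b1' : c1.toNat ≤ 90 := h1'
        by_cases hc1 : c1 < 'Z'
        · have hb1 : c1.toNat < 90 := hc1
          rw [if_pos hc1]
          have H1 : (65 + ((pvCodeIndex m + 1) % 676) / 26 : Int) = (c0.toNat : Int) := by
            rw [hidx]; omega
          have H2 : (65 + ((pvCodeIndex m + 1) % 676) % 26 : Int) = ((c1.toNat : Int) + 1) := by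
            rw [hidx]; omega
          rw [H1, H2]
          have T1 : ((c0.toNat : Int)).toNat = c0.toNat := Int.toNat_natCast _
          have T2 : (((c1.toNat : Int)) + 1).toNat = c1.toNat + 1 := by omega
          rw [T1, T2, Char.ofNat_toNat]
        · have hb1 : c1.toNat = 90 := by
            have : ¬ c1.toNat < 90 := hc1
            omega
          rw [if_neg hc1]
          by_cases hc0 : c0 < 'Z'
          · have hb0 : c0.toNat < 90 := hc0
            rw [if_pos hc0]
            have H1 : (65 + ((pvCodeIndex m + 1) % 676) / 26 : Int) = ((c0.toNat : Int) + 1) := by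
              rw [hidx]; omega
            have H2 : (65 + ((pvCodeIndex m + 1) % 676) % 26 : Int) = 65 := by
              rw [hidx]; omega
            rw [H1, H2]
            have T1 : (((c0.toNat : Int)) + 1).toNat = c0.toNat + 1 := by omega
            rw [T1]
            rfl
          · have hb0 : c0.toNat = 90 := by
              have : ¬ c0.toNat < 90 := hc0
              omega
            rw [if_neg hc0]
            have H : pvCodeIndex m + 1 = 676 := by rw [hidx]; omega
            rw [H]
            rfl
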